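-- pv_equiv track=rewrite | github.com/Bonface-Odhiambo/lesson-11 | removeonly_firstegg.py | remove_egg
-- ===== SOURCE A (Python) =====
-- def remove_egg (foods):
--     result = []
--     egg_count = 0 # counter for eggs removed
--
--     for i in range(len(foods)):
--         if foods [i] == 'egg' and egg_count<2:
--             egg_count +=1
--             continue
--         result.append (foods[i])
--     return result
-- ===== SOURCE B (Python) =====
-- def remove_egg(foods):
--     result = list(foods)
--     for _ in range(2):
--         try:
--             result.remove('egg')
--         except ValueError:
--             break
--     return result
-- ===== Notes on version B (the rewrite author's own statement) =====
-- stated objective: idiomatic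
-- what changed: Replaces the counter-guarded index pass that rebuilds the list element by element with a copy of the input followed by up to two list.remove('egg') calls (library scan-and-delete), breaking early when no 'egg' remains.
import Mathlib
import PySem

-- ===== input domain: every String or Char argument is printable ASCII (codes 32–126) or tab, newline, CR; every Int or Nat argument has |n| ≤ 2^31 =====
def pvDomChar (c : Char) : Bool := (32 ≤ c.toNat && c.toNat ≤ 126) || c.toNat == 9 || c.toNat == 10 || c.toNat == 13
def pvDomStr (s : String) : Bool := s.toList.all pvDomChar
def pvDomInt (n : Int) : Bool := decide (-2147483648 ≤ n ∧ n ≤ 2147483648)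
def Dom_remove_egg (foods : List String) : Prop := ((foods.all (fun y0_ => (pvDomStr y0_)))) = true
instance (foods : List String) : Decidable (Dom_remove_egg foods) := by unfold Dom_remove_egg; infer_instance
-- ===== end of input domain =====

-- B replaces A's counter-guarded rebuilding pass with a copy plus up to two list.remove('egg') calls (idiomatic; same cost).

-- ===== PORT A =====
-- A's loop over i in range(len(foods)) visits the elements in order; state = (result, egg_count).
def remove_egg (foods : List String) : List String :=
  (foods.foldl
    (fun (st : List String × Int) f =>
      if f = "egg" ∧ st.2 < 2 then (st.1, st.2 + 1) else (st.1 ++ [f], st.2))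
    ([], 0)).1

-- ===== PORT B =====
-- result.remove('egg') = PySem.List.remove?; except ValueError: break = the 'none' branch keeping the list.
def remove_egg_alt (foods : List String) : List String :=
  match PySem.List.remove? foods "egg" with
  | none => foods
  | some r1 =>
    match PySem.List.remove? r1 "egg" with
    | none => r1
    | some r2 => r2

-- ===== PRECONDITION & SPEC =====
def Spec_remove_egg (foods : List String) (out : List String) : Prop := out = remove_egg_alt foods
instance (foods : List String) (out : List String) : Decidable (Spec_remove_egg foods out) := by unfold Spec_remove_egg; infer_instance

-- ===== CLAIM (what is proved, stated in full; the proofs are below) =====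
def Claim_equal_remove_egg : Prop := ∀ (foods : List String), Dom_remove_egg foods → Spec_remove_egg foods (remove_egg foods)

-- ===== LEMMAS AND PROOFS =====

-- once the counter is saturated (c ≥ 2) A's loop appends every remaining element
theorem foldl_sat (foods : List String) (acc : List String) (c : Int) (hc : 2 ≤ c) :
    (foods.foldl
      (fun (st : List String × Int) f =>
        if f = "egg" ∧ st.2 < 2 then (st.1, st.2 + 1) else (st.1 ++ [f], st.2))
      (acc, c)).1 = acc ++ foods := by
  induction foods generalizing acc with
  | nil => simp
  | cons x xs ih =>
    simp only [List.foldl_cons]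
    rw [if_neg (by rintro ⟨_, h⟩; omega)]
    rw [ih _]; simp

-- with counter 1 A's loop performs exactly one more remove? of "egg"
theorem foldl_one (foods : List String) (acc : List String) :
    (foods.foldl
      (fun (st : List String × Int) f =>
        if f = "egg" ∧ st.2 < 2 then (st.1, st.2 + 1) else (st.1 ++ [f], st.2))
      (acc, 1)).1 =
    acc ++ (match PySem.List.remove? foods "egg" with
            | none => foods
            | some r => r) := by
  induction foods generalizing acc with
  | nil => simp [PySem.List.remove?]
  | cons x xs ih =>
    by_cases hx : x = "egg"
    · subst hx
      simp only [List.foldl_cons]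
      rw [if_pos (show True ∧ (1:Int) < 2 from ⟨trivial, by norm_num⟩)]
      rw [foldl_sat xs acc (1 + 1) (by norm_num), PySem.List.remove?_cons_self]
    · simp only [List.foldl_cons]
      rw [if_neg (by rintro ⟨h, _⟩; exact hx h)]
      rw [ih (acc ++ [x]), PySem.List.remove?_cons_of_ne _ hx]
      cases PySem.List.remove? xs "egg" <;> simp

-- with counter 0 A's loop performs remove? of "egg" twice
theorem foldl_zero (foods : List String) (acc : List String) :
    (foods.foldl
      (fun (st : List String × Int) f =>
        if f = "egg" ∧ st.2 < 2 then (st.1, st.2 + 1) else (st.1 ++ [f], st.2))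
      (acc, 0)).1 =
    acc ++ (match PySem.List.remove? foods "egg" with
            | none => foods
            | some r1 =>
              match PySem.List.remove? r1 "egg" with
              | none => r1
              | some r2 => r2) := by
  induction foods generalizing acc with
  | nil => simp [PySem.List.remove?]
  | cons x xs ih =>
    by_cases hx : x = "egg"
    · subst hx
      simp only [List.foldl_cons]
      rw [if_pos (show True ∧ (0:Int) < 2 from ⟨trivial, by norm_num⟩)]
      rw [show ((0:Int) + 1) = 1 from by norm_num]
      rw [foldl_one xs acc, PySem.List.remove?_cons_self]
    · simp only [List.foldl_cons]
      rw [if_neg (by rintro ⟨h, _⟩; exact hx h)]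
      rw [ih (acc ++ [x]), PySem.List.remove?_cons_of_ne _ hx]
      cases h1 : PySem.List.remove? xs "egg" with
      | none => simp
      | some r1 =>
        simp only [Option.map_some]
        rw [PySem.List.remove?_cons_of_ne _ hx]
        cases PySem.List.remove? r1 "egg" <;> simp

-- ===== VERDICT (by name: the statement is the Claim_ definition above) =====
theorem remove_egg_spec : Claim_equal_remove_egg := by
  intro foods _
  show remove_egg foods = remove_egg_alt foods
  unfold remove_egg remove_egg_alt
  rw [foldl_zero foods []]
  simp
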